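-- pv_equiv track=rewrite | github.com/hamster513/STools | vulnanalizer/app/utils/file_utils.py | split_csv_automatically
-- ===== SOURCE A (Python) =====
-- from typing import List
--
-- def split_csv_automatically(content: str, max_lines: int = 1000000, delimiter: str = ';') -> List[str]:
--     """
--     Автоматически разделить CSV контент на части
--
--     Args:
--         content (str): Содержимое CSV файла
--         max_lines (int): Максимальное количество строк в части
--         delimiter (str): Разделитель CSV
--
--     Returns:
--         list: Список частей CSV (каждая часть - строка с содержимым)
--     """
--     lines = content.splitlines()
--     total_lines = len(lines)
--
--     if total_lines <= max_lines:
--         return [content]  # Файл не нужно разделять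
--
--     # Читаем заголовки
--     headers = lines[0]
--     data_lines = lines[1:]
--
--     parts = []
--     for i in range(0, len(data_lines), max_lines):
--         part_lines = data_lines[i:i + max_lines]
--         part_content = headers + '\n' + '\n'.join(part_lines)
--         parts.append(part_content)
--
--     return parts
-- ===== SOURCE B (Python) =====
-- from typing import List
--
-- def split_csv_automatically(content: str, max_lines: int = 1000000, delimiter: str = ';') -> List[str]:
--     """Streaming re-implementation: one pass over the data lines with a buffer
--     flushed every max_lines lines, plus a final flush of the remainder."""
--     lines = content.splitlines()
--     if len(lines) <= max_lines:
--         return [content]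
--     headers = lines[0]
--     parts = []
--     buf = []
--     for line in lines[1:]:
--         buf.append(line)
--         if len(buf) == max_lines:
--             parts.append(headers + '\n' + '\n'.join(buf))
--             buf = []
--     if buf:
--         parts.append(headers + '\n' + '\n'.join(buf))
--     return parts
-- ===== Notes on version B (the rewrite author's own statement) =====
-- stated objective: alternative
-- what changed: Replaces A's index/slice chunking loop (range stepping by max_lines, slicing each block) by a single streaming pass that buffers lines and flushes a part every max_lines lines plus a final remainder; Pre_ excludes nonpositive max_lines when the content has two or more lines, where A raises (ValueError/IndexError) or returns an accidental empty list from range's negative step while data lines exist.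
-- outside the precondition, e.g. on split_csv_automatically('a\nb', -1, ';'): A returns [], B returns ['a\nb']
import Mathlib
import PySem

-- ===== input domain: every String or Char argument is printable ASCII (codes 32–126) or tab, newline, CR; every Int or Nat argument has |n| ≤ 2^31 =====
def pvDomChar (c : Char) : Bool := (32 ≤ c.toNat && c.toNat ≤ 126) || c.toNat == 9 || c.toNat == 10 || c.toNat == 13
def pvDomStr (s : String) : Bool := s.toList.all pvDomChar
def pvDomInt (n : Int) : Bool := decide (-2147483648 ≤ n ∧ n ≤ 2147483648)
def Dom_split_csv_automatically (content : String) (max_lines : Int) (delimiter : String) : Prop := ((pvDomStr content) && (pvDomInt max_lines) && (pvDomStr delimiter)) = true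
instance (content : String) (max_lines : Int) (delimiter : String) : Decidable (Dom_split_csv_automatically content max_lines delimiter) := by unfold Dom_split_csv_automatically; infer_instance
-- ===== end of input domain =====

-- B replaces A's index/slice chunking loop by a single streaming pass with a
-- line buffer flushed every max_lines lines (alternative decomposition, same cost).

-- ===== PORT A =====
def split_csv_automatically (content : String) (max_lines : Int) (delimiter : String) : List String :=
  let lines := PySem.Str.splitlines content
  let total_lines : Int := lines.length
  if total_lines ≤ max_lines then [content]
  else
    let headers := (PySem.List.pyGet? lines 0).getD ""   -- lines[0]; nonempty under Pre_
    let data_lines := PySem.List.slice lines (some 1) none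
    (PySem.List.pyRange 0 (data_lines.length : Int) max_lines).foldl
      (fun parts i =>
        parts ++ [headers ++ "\n" ++
          PySem.Str.join "\n" (PySem.List.slice data_lines (some i) (some (i + max_lines)))])
      []

-- ===== PORT B =====
def split_csv_automatically_alt (content : String) (max_lines : Int) (delimiter : String) : List String :=
  let lines := PySem.Str.splitlines content
  if (lines.length : Int) ≤ max_lines then [content]
  else
    let headers := (PySem.List.pyGet? lines 0).getD ""   -- lines[0]; nonempty under Pre_
    let st := (PySem.List.slice lines (some 1) none).foldl
      (fun (st : List String × List String) line =>
        let buf := st.2 ++ [line]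
        if (buf.length : Int) = max_lines then
          (st.1 ++ [headers ++ "\n" ++ PySem.Str.join "\n" buf], ([] : List String))
        else (st.1, buf))
      ([], [])
    if st.2.isEmpty then st.1 else st.1 ++ [headers ++ "\n" ++ PySem.Str.join "\n" st.2]

-- ===== PRECONDITION & SPEC =====
-- Pre_ excludes nonpositive max_lines when the content has two or more lines (more
-- than max_lines): there A raises (ValueError for step 0, IndexError on an empty line
-- list) or, for negative max_lines, returns an accidental empty list from range's
-- negative step while there are data lines to emit.
def Pre_split_csv_automatically (content : String) (max_lines : Int) (delimiter : String) : Prop :=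
  1 ≤ max_lines ∨ ((PySem.Str.splitlines content).length : Int) ≤ max_lines ∨
    (max_lines < 0 ∧ (PySem.Str.splitlines content).length = 1)
instance (content : String) (max_lines : Int) (delimiter : String) : Decidable (Pre_split_csv_automatically content max_lines delimiter) := by unfold Pre_split_csv_automatically; infer_instance
def pvWitness_split_csv_automatically : String × Int × String := ("a\nb\nc", 1, ";")

def Spec_split_csv_automatically (content : String) (max_lines : Int) (delimiter : String) (out : List String) : Prop := out = split_csv_automatically_alt content max_lines delimiter
instance (content : String) (max_lines : Int) (delimiter : String) (out : List String) : Decidable (Spec_split_csv_automatically content max_lines delimiter out) := by unfold Spec_split_csv_automatically; infer_instance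

-- ===== CLAIM (what is proved, stated in full; the proofs are below) =====
def Claim_equal_split_csv_automatically : Prop := ∀ (content : String) (max_lines : Int) (delimiter : String), Dom_split_csv_automatically content max_lines delimiter → Pre_split_csv_automatically content max_lines delimiter → Spec_split_csv_automatically content max_lines delimiter (split_csv_automatically content max_lines delimiter)

-- ===== LEMMAS AND PROOFS =====

-- the chunk list both loops compute: successive blocks of m lines
def pvChunks (m : Nat) : List String → List (List String)
  | [] => []
  | x :: xs => (x :: xs.take (m - 1)) :: pvChunks m (xs.drop (m - 1))
termination_by l => l.length
decreasing_by simp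

theorem pvChunks_nil (m : Nat) : pvChunks m [] = [] := by
  unfold pvChunks; rfl

theorem pvChunks_cons (m : Nat) (x : String) (xs : List String) :
    pvChunks m (x :: xs) = (x :: xs.take (m - 1)) :: pvChunks m (xs.drop (m - 1)) := by
  conv_lhs => unfold pvChunks

theorem pvChunks_eq (m : Nat) (l : List String) (hm : 1 ≤ m) (hl : l ≠ []) :
    pvChunks m l = l.take m :: pvChunks m (l.drop m) := by
  obtain ⟨m', rfl⟩ : ∃ m', m = m' + 1 := ⟨m - 1, by omega⟩
  cases l with
  | nil => exact absurd rfl hl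
  | cons x xs => rw [pvChunks_cons]; simp

theorem pvRange_pos_cons (m n : Int) (hm : 0 < m) (hn : 0 < n) :
    PySem.List.pyRange 0 n m = 0 :: (PySem.List.pyRange 0 (n - m) m).map (· + m) := by
  rw [PySem.List.pyRange_of_pos _ _ hm, PySem.List.pyRange_of_pos _ _ hm]
  rw [if_pos hn]
  have hq : (n - 0 + m - 1) / m = (n - 1) / m + 1 := by
    rw [show n - 0 + m - 1 = (n - 1) + 1 * m by ring, Int.add_mul_ediv_right _ _ (ne_of_gt hm)]
  have hnn : 0 ≤ (n - 1) / m := Int.ediv_nonneg (by omega) (by omega)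
  have hT : (n - 0 + m - 1) / m = ((n - 1) / m).toNat + 1 := by omega
  rw [hT, show ((((n-1)/m).toNat + 1 : Int)).toNat = ((n-1)/m).toNat + 1 by omega]
  rw [List.range_succ_eq_map]
  by_cases hc : 0 < n - m
  · rw [if_pos hc]
    have he : (n - m - 0 + m - 1) / m = (n - 1) / m := by ring_nf
    rw [he]
    simp only [List.map_cons, List.map_map]
    congr 1
    · simp
    · apply List.map_congr_left; intro k _; simp [Function.comp]; ring
  · rw [if_neg hc]
    have h1 : (n - 1) / m = 0 := Int.ediv_eq_zero_of_lt (by omega) (by omega)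
    simp [h1]

theorem pvRange_zero_stop (m : Int) : PySem.List.pyRange 0 0 m = [] := by
  unfold PySem.List.pyRange
  split <;> simp

theorem pvRange_nonpos (m n : Int) (hm : 0 < m) (hn : n ≤ 0) :
    PySem.List.pyRange 0 n m = [] := by
  rw [PySem.List.pyRange_of_pos _ _ hm, if_neg (by omega)]
  simp

theorem pv_foldA (m : Int) (hm : 1 ≤ m) (f : List String → String) (l : List String)
    (acc : List String) :
    (PySem.List.pyRange 0 (l.length : Int) m).foldl
      (fun p i => p ++ [f (PySem.List.slice l (some i) (some (i + m)))]) acc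
    = acc ++ (pvChunks m.toNat l).map f := by
  by_cases hl : l = []
  · subst hl
    simp only [List.length_nil, Nat.cast_zero]
    rw [pvRange_nonpos m 0 (by omega) le_rfl]
    simp [pvChunks_nil]
  · have hn : (0 : Int) < (l.length : Int) := by
      have := List.length_pos_iff.mpr hl; exact_mod_cast this
    rw [pvRange_pos_cons m _ (by omega) hn]
    simp only [List.foldl_cons, List.foldl_map]
    have hslice0 : PySem.List.slice l (some 0) (some (0 + m)) = l.take m.toNat := by
      rw [PySem.List.slice_toNat l le_rfl (by omega)]
      simp
    rw [hslice0]
    have hshift : ∀ p i, 0 ≤ i →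
        (p ++ [f (PySem.List.slice l (some (i + m)) (some (i + m + m)))])
        = (p ++ [f (PySem.List.slice (l.drop m.toNat) (some i) (some (i + m)))]) := by
      intro p i hi
      rw [PySem.List.slice_toNat l (by omega) (by omega),
          PySem.List.slice_toNat (l.drop m.toNat) hi (by omega)]
      rw [List.drop_drop]
      rw [show m.toNat + i.toNat = (i + m).toNat by omega,
          show (i + m + m).toNat - (i + m).toNat = (i + m).toNat - i.toNat by omega]
    have hcong : (PySem.List.pyRange 0 ((l.length : Int) - m) m).foldl
          (fun p i => p ++ [f (PySem.List.slice l (some (i + m)) (some (i + m + m)))])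
          (acc ++ [f (l.take m.toNat)])
        = (PySem.List.pyRange 0 ((l.length : Int) - m) m).foldl
          (fun p i => p ++ [f (PySem.List.slice (l.drop m.toNat) (some i) (some (i + m)))])
          (acc ++ [f (l.take m.toNat)]) := by
      apply PySem.List.foldl_congr_mem
      intro p i hi
      exact hshift p i ((PySem.List.mem_pyRange_iff_of_pos (by omega : (0:Int) < m) i).1 hi).1
    rw [hcong]
    have hlen : ((l.drop m.toNat).length : Int) = max ((l.length : Int) - m) 0 := by
      simp; omega
    by_cases hc : (l.length : Int) - m ≤ 0
    · rw [pvRange_nonpos m _ (by omega) hc]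
      have hdrop : l.drop m.toNat = [] := by
        apply List.drop_eq_nil_of_le; omega
      rw [pvChunks_eq m.toNat l (by omega) hl, hdrop]
      simp [pvChunks_nil]
    · have : (PySem.List.pyRange 0 ((l.length : Int) - m) m)
          = (PySem.List.pyRange 0 ((l.drop m.toNat).length : Int) m) := by
        rw [hlen, max_eq_left (by omega)]
      rw [this]
      rw [pv_foldA m hm f (l.drop m.toNat) (acc ++ [f (l.take m.toNat)])]
      rw [pvChunks_eq m.toNat l (by omega) hl]
      simp
termination_by l.length
decreasing_by simp; omega

theorem pv_foldB (m : Int) (hm : 1 ≤ m) (f : List String → String) (l : List String)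
    (parts buf : List String) (hb : (buf.length : Int) < m) :
    (let st := l.foldl
        (fun (st : List String × List String) line =>
          let b := st.2 ++ [line]
          if (b.length : Int) = m then (st.1 ++ [f b], ([] : List String)) else (st.1, b))
        (parts, buf);
     if st.2.isEmpty then st.1 else st.1 ++ [f st.2])
    = parts ++ (pvChunks m.toNat (buf ++ l)).map f := by
  induction l generalizing parts buf with
  | nil =>
    by_cases hbe : buf = []
    · subst hbe; simp [pvChunks_nil]
    · simp only [List.foldl_nil, List.append_nil]
      rw [if_neg (by simpa using hbe)]
      rw [pvChunks_eq m.toNat buf (by omega) hbe]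
      have ht : buf.take m.toNat = buf := List.take_of_length_le (by omega)
      have hd : buf.drop m.toNat = [] := List.drop_eq_nil_of_le (by omega)
      rw [ht, hd]
      simp [pvChunks_nil]
  | cons x xs ih =>
    simp only [List.foldl_cons]
    by_cases hfull : (((buf ++ [x]).length : Int) = m)
    · rw [if_pos hfull]
      rw [ih (parts ++ [f (buf ++ [x])]) [] (by simpa using hm)]
      have hne : buf ++ x :: xs ≠ [] := by simp
      rw [show buf ++ x :: xs = (buf ++ [x]) ++ xs by simp]
      rw [pvChunks_eq m.toNat ((buf ++ [x]) ++ xs) (by omega) (by simp)]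
      have hlen : (buf ++ [x]).length = m.toNat := by simp at hfull ⊢; omega
      rw [show ((buf ++ [x]) ++ xs).take m.toNat = buf ++ [x] by
            rw [← hlen, List.take_left]]
      rw [show ((buf ++ [x]) ++ xs).drop m.toNat = xs by
            rw [← hlen, List.drop_left]]
      simp
    · rw [if_neg hfull]
      rw [ih parts (buf ++ [x]) (by simp at hfull ⊢; omega)]
      simp

-- ===== VERDICT (by name: the statement is the Claim_ definition above) =====
theorem split_csv_automatically_spec : Claim_equal_split_csv_automatically := by
  intro content max_lines delimiter _ hpre
  unfold Spec_split_csv_automatically split_csv_automatically split_csv_automatically_alt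
  simp only []
  by_cases hle : ((PySem.Str.splitlines content).length : Int) ≤ max_lines
  · rw [if_pos hle, if_pos hle]
  · rw [if_neg hle, if_neg hle]
    set lines := PySem.Str.splitlines content with hlines
    set hd := (PySem.List.pyGet? lines 0).getD "" with hhd
    set l := PySem.List.slice lines (some 1) none with hl
    rcases hpre with hm | h | hone
    · rw [pv_foldA max_lines hm (fun c => hd ++ "\n" ++ PySem.Str.join "\n" c) l []]
      rw [pv_foldB max_lines hm (fun c => hd ++ "\n" ++ PySem.Str.join "\n" c) l [] []
          (by simp; omega)]
      simp
    · exact absurd h hle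
    · -- a single line and negative max_lines: no data lines, both loops do nothing
      have hlnil : l = [] := by
        rw [hl, PySem.List.slice_from_one]
        have h1 : lines.length = 1 := by rw [hlines]; exact hone.2
        cases hlines' : lines with
        | nil => simp
        | cons y ys =>
          rw [hlines'] at h1
          simp at h1 ⊢
          exact h1
      rw [hlnil]
      simp only [List.length_nil, Nat.cast_zero, List.foldl_nil]
      rw [pvRange_zero_stop]
      simp
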